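-- pv_equiv track=rewrite | github.com/ErvinCs/CSUBB | 1-FP-fundamentals-of-programming/Lab01-02/domain/integerList.py | primeNrSequence
-- ===== SOURCE A (Python) =====
-- def primeNumber(number):
--     '''
--     Checks if a number is prime.
--     :return: True if number is prime; False otherwise.
--     '''
--     if number == 0 or number == 1:
--         return False
--     if number == 2:
--         return True
--     for i in range(2, (number//2 + 1)):
--         if number % i == 0:
--             return False
--     return True
--
-- def primeNrSequence(list):
--     '''
--     :return: The longest sequence of prime numbers in list; [] if no such sequence exists.
--     '''
--     result = []
--     tempResult = []
--     i = 0
--     while i < len(list):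
--         while i < len(list) and primeNumber(list[i]):
--             tempResult.append(list[i])
--             i += 1
--         i += 1
--         if len(tempResult) > len(result) and len(tempResult) > 1:
--             result = tempResult
--         tempResult = []
--     return result
-- ===== SOURCE B (Python) =====
-- def primeNumber(number):
--     '''
--     Checks if a number is prime.
--     :return: True if number is prime; False otherwise.
--     '''
--     if number == 0 or number == 1:
--         return False
--     if number == 2:
--         return True
--     for i in range(2, (number//2 + 1)):
--         if number % i == 0:
--             return False
--     return True
--
-- def primeNrSequence(list):
--     '''
--     :return: The longest sequence of prime numbers in list; [] if no such sequence exists.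
--     '''
--     # Dynamic programming on suffixes: run[k] = length of the run of primes
--     # starting at index k (0 if list[k] is not prime), filled right-to-left.
--     n = len(list)
--     run = [0] * (n + 1)
--     for k in range(n - 1, -1, -1):
--         run[k] = run[k + 1] + 1 if primeNumber(list[k]) else 0
--     # The first longest run starts at the first index holding the maximum.
--     best = max(run)
--     if best < 2:
--         return []
--     i = run.index(best)
--     return list[i:i + best]
-- ===== Notes on version B (the rewrite author's own statement) =====
-- stated objective: alternative
-- what changed: Replaces A's nested while-loop scan that accumulates and compares candidate runs with a suffix dynamic program: a run-length table run[k] (length of the prime run starting at k) is filled right-to-left, then the answer is read off as the slice list[i:i+best] at the first index of the table's maximum (returning [] when the maximum is below 2).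
import Mathlib
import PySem

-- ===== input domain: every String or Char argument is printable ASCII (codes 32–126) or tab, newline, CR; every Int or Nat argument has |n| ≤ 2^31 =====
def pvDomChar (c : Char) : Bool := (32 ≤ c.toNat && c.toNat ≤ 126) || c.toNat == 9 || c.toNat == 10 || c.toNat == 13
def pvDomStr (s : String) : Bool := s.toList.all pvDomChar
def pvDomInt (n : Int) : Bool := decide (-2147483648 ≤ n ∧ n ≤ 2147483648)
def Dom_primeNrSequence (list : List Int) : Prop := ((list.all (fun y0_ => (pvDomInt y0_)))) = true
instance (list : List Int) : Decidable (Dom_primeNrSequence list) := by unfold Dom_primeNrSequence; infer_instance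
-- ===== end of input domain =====

-- B replaces A's nested while-loop scan by a suffix dynamic program: a run-length
-- table (run[k] = length of the prime run starting at k) filled right-to-left, then
-- the answer is the slice at the first index of the table's maximum (or [] if max < 2).
-- Same asymptotic cost; no speed claim.


-- ===== PORT A =====
-- primeNumber, identical in both Pythons (A and B share this helper verbatim).
-- The 'for i in range(2, number//2 + 1)' loop with early 'return False' is ported by hand,
-- step for step, as a lazy traversal of the same range (i = 2, 2+1, ... while i < number//2 + 1),
-- exact for every Int: materializing the range as a list would change nothing but the cost.
-- fuel = number of remaining loop indices only makes the recursion structural.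
def pvPrimeLoop (number : Int) (fuel : Nat) (i : Int) : Bool :=
  match fuel with
  | 0 => true
  | fuel + 1 =>
    if i < PySem.Int.floordiv number 2 + 1 then
      if PySem.Int.mod number i == 0 then false
      else pvPrimeLoop number fuel (i + 1)
    else true

def primeNumber (number : Int) : Bool :=
  if number = 0 ∨ number = 1 then false
  else if number = 2 then true
  else pvPrimeLoop number (PySem.Int.floordiv number 2 + 1 - 2).toNat 2

-- inner while: consumes primes from index i; i : Nat since Python's i starts at 0 and only
-- increments; list[i] is ported as getD under the guard i < length, where it is exact.
-- fuel = (remaining indices) only makes the recursion structural; it never cuts the loop short.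
def pvInnerA (l : List Int) (fuel : Nat) (i : Nat) (temp : List Int) : Nat × List Int :=
  match fuel with
  | 0 => (i, temp)
  | fuel + 1 =>
    if i < l.length ∧ primeNumber (l.getD i 0) then
      pvInnerA l fuel (i + 1) (temp ++ [l.getD i 0])
    else (i, temp)

-- outer while loop of A; fuel = l.length suffices since i grows by at least 1 per iteration
def pvOuterA (l : List Int) (fuel : Nat) (i : Nat) (result : List Int) : List Int :=
  match fuel with
  | 0 => result
  | fuel + 1 =>
    if i < l.length then
      pvOuterA l fuel ((pvInnerA l (l.length - i) i []).1 + 1)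
        (if (pvInnerA l (l.length - i) i []).2.length > result.length ∧
            (pvInnerA l (l.length - i) i []).2.length > 1
         then (pvInnerA l (l.length - i) i []).2 else result)
    else result

def primeNrSequence (list : List Int) : List Int :=
  pvOuterA list list.length 0 []

-- ===== PORT B =====
-- Source B's backward fill 'for k in range(n-1,-1,-1): run[k] = run[k+1]+1 if prime else 0'
-- builds run[k] from run[k+1] only, so it is ported as the structural right-to-left
-- recursion it computes: the table for x::xs prepends to the (already filled) table for xs,
-- whose head is run[k+1]; the table is never empty, so headD 0 is exact.
def pvRunTable (l : List Int) : List Int :=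
  match l with
  | [] => [0]
  | x :: xs =>
    let t := pvRunTable xs
    (if primeNumber x then t.headD 0 + 1 else 0) :: t

-- best = max(run); i = run.index(best); return list[i:i+best].  max() and .index()
-- raise only on an empty / missing-value list, which cannot happen (the table is
-- nonempty and contains its maximum): the 'none' fallbacks are unreachable.
def primeNrSequence_alt (list : List Int) : List Int :=
  match PySem.List.max? (pvRunTable list) (fun v => v) with
  | none => []      -- unreachable: run has length list.length + 1
  | some best =>
    if best < 2 then []
    else
      match PySem.List.index? (pvRunTable list) best with
      | none => []  -- unreachable: best is an element of run
      | some i => PySem.List.slice list (some (i : Int)) (some ((i : Int) + best))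

-- ===== PRECONDITION & SPEC =====
def Spec_primeNrSequence (list : List Int) (out : List Int) : Prop := out = primeNrSequence_alt list
instance (list : List Int) (out : List Int) : Decidable (Spec_primeNrSequence list out) := by unfold Spec_primeNrSequence; infer_instance

-- ===== CLAIM (what is proved, stated in full; the proofs are below) =====
def Claim_equal_primeNrSequence : Prop := ∀ (list : List Int), Dom_primeNrSequence list → Spec_primeNrSequence list (primeNrSequence list)

-- ===== LEMMAS AND PROOFS =====

-- A's update step
def pvUpd (best r : List Int) : List Int :=
  if r.length > best.length ∧ r.length > 1 then r else best

-- the maximal prime runs of a list, as a reference decomposition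
def pvRuns : List Int → List (List Int)
  | [] => []
  | x :: xs =>
    if primeNumber x then
      (x :: xs.takeWhile primeNumber) :: pvRuns (xs.drop ((xs.takeWhile primeNumber).length + 1))
    else pvRuns xs
termination_by l => l.length
decreasing_by
  · simp [List.length_drop]
  · simp

theorem pvDropWhile_eq_drop (p : Int → Bool) (xs : List Int) :
    xs.dropWhile p = xs.drop (xs.takeWhile p).length := by
  induction xs with
  | nil => simp
  | cons x t ih =>
    by_cases hp : p x
    · rw [List.dropWhile_cons_of_pos hp, List.takeWhile_cons_of_pos hp]
      simpa using ih
    · rw [List.dropWhile_cons_of_neg hp, List.takeWhile_cons_of_neg hp]; simp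

-- characterization of A's inner while (fuel sufficient: the loop runs to its real end)
theorem pvInnerA_eq (l : List Int) (fuel i : Nat) (temp : List Int)
    (hf : l.length - i ≤ fuel) :
    pvInnerA l fuel i temp =
      (i + ((l.drop i).takeWhile primeNumber).length,
       temp ++ (l.drop i).takeWhile primeNumber) := by
  induction fuel generalizing i temp with
  | zero =>
    rw [List.drop_eq_nil_of_le (by omega)]
    simp [pvInnerA]
  | succ fuel ih =>
    simp only [pvInnerA]
    by_cases hc : i < l.length ∧ primeNumber (l.getD i 0)
    · rw [if_pos hc]
      obtain ⟨hi, hp⟩ := hc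
      rw [List.getD_eq_getElem l 0 hi] at hp ⊢
      rw [List.drop_eq_getElem_cons hi, List.takeWhile_cons_of_pos hp]
      rw [ih (i + 1) _ (by omega)]
      simp; omega
    · rw [if_neg hc]
      by_cases hi : i < l.length
      · have hp : ¬ primeNumber (l.getD i 0) := fun hp => hc ⟨hi, hp⟩
        rw [List.getD_eq_getElem l 0 hi] at hp
        rw [List.drop_eq_getElem_cons hi, List.takeWhile_cons_of_neg hp]
        simp
      · rw [List.drop_eq_nil_of_le (by omega)]; simp

-- characterization of A's outer while
theorem pvOuterA_eq (l : List Int) (fuel i : Nat) (result : List Int)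
    (hf : l.length - i ≤ fuel) :
    pvOuterA l fuel i result = (pvRuns (l.drop i)).foldl pvUpd result := by
  induction fuel generalizing i result with
  | zero =>
    rw [List.drop_eq_nil_of_le (by omega)]
    simp [pvOuterA, pvRuns]
  | succ fuel ih =>
    simp only [pvOuterA]
    by_cases h : i < l.length
    · rw [if_pos h]
      rw [pvInnerA_eq l (l.length - i) i [] (by omega)]
      simp only [List.nil_append]
      rw [List.drop_eq_getElem_cons h]
      by_cases hp : primeNumber l[i]
      · rw [List.takeWhile_cons_of_pos hp]
        rw [pvRuns]
        simp only [hp, if_pos]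
        rw [List.foldl_cons]
        rw [ih (i + (l[i] :: (l.drop (i + 1)).takeWhile primeNumber).length + 1) _ (by omega)]
        have hdrop : l.drop (i + (l[i] :: (l.drop (i + 1)).takeWhile primeNumber).length + 1)
            = (l.drop (i + 1)).drop (((l.drop (i + 1)).takeWhile primeNumber).length + 1) := by
          rw [List.drop_drop]
          congr 1
          simp; omega
        rw [hdrop]
        congr 1
      · rw [List.takeWhile_cons_of_neg hp]
        rw [pvRuns]
        simp only [hp, Bool.false_eq_true, if_neg, not_false_iff]
        have ihs := ih (i + 1) result (by omega)
        simpa using ihs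
    · rw [if_neg h]
      rw [List.drop_eq_nil_of_le (by omega), pvRuns, List.foldl_nil]

-- recursive "first longest qualifying run": earlier runs win ties
def pvM : List (List Int) → List Int
  | [] => []
  | r :: rs => if r.length > 1 ∧ (pvM rs).length ≤ r.length then r else pvM rs

theorem pvM_len (rs : List (List Int)) : (pvM rs).length ≠ 1 := by
  induction rs with
  | nil => simp [pvM]
  | cons r rs ih =>
    simp only [pvM]
    split_ifs with h
    · omega
    · exact ih

theorem foldl_pvUpd (rs : List (List Int)) (acc : List Int) :
    rs.foldl pvUpd acc = if acc.length < (pvM rs).length then pvM rs else acc := by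
  induction rs generalizing acc with
  | nil => simp [pvM]
  | cons r rs ih =>
    rw [List.foldl_cons, ih]
    simp only [pvM, pvUpd]
    split_ifs <;> first | rfl | omega

theorem foldl_pvUpd_nil (rs : List (List Int)) : rs.foldl pvUpd [] = pvM rs := by
  rw [foldl_pvUpd]
  split_ifs with h
  · rfl
  · have h1 := pvM_len rs
    have h0 : (pvM rs).length = 0 := by
      simp only [List.length_nil, Nat.not_lt, Nat.le_zero] at h
      exact h
    exact (List.length_eq_zero_iff.mp h0).symm

-- length of the leading prime run
def pvTw (l : List Int) : Nat := (l.takeWhile primeNumber).length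

theorem pvTw_cons (x : Int) (xs : List Int) :
    pvTw (x :: xs) = if primeNumber x then pvTw xs + 1 else 0 := by
  unfold pvTw
  by_cases hp : primeNumber x
  · rw [List.takeWhile_cons_of_pos hp]; simp [hp]
  · rw [List.takeWhile_cons_of_neg hp]; simp [hp]

theorem pvRunTable_head (l : List Int) : (pvRunTable l).headD 0 = (pvTw l : Int) := by
  induction l with
  | nil => simp [pvRunTable, pvTw]
  | cons x xs ih =>
    show (if primeNumber x then (pvRunTable xs).headD 0 + 1 else 0) = _
    rw [ih, pvTw_cons]
    split_ifs with hp <;> simp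

theorem pvRunTable_cons (x : Int) (xs : List Int) :
    pvRunTable (x :: xs) = ((pvTw (x :: xs) : Nat) : Int) :: pvRunTable xs := by
  show ((if primeNumber x then (pvRunTable xs).headD 0 + 1 else 0) :: pvRunTable xs) = _
  rw [pvRunTable_head, pvTw_cons]
  split_ifs with hp <;> simp

-- the descending block k, k-1, ..., 1 that a prime run of length k writes into the table
def pvDesc (k : Nat) : List Int := (List.range k).map (fun j => ((k - j : Nat) : Int))

theorem pvDesc_succ (k : Nat) : pvDesc (k + 1) = ((k + 1 : Nat) : Int) :: pvDesc k := by
  unfold pvDesc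
  rw [List.range_succ_eq_map]
  simp only [List.map_cons, List.map_map]
  refine congrArg₂ _ (by simp) (List.map_congr_left ?_)
  intro j hj
  simp only [Function.comp_apply]
  congr 1
  omega

theorem mem_pvDesc (k : Nat) (v : Int) (hv : v ∈ pvDesc k) : 1 ≤ v ∧ v ≤ (k : Int) := by
  unfold pvDesc at hv
  obtain ⟨j, hj, rfl⟩ := List.mem_map.mp hv
  rw [List.mem_range] at hj
  constructor
  · exact_mod_cast Nat.one_le_iff_ne_zero.mpr (by omega)
  · exact_mod_cast Nat.sub_le k j

theorem length_pvDesc (k : Nat) : (pvDesc k).length = k := by simp [pvDesc]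

-- the run table decomposes as the descending block of the leading run ++ the tail table
theorem pvRunTable_decomp (l : List Int) :
    pvRunTable l = pvDesc (pvTw l) ++ pvRunTable (l.drop (pvTw l)) := by
  induction l with
  | nil => simp [pvTw, pvDesc]
  | cons x xs ih =>
    by_cases hp : primeNumber x
    · have htw : pvTw (x :: xs) = pvTw xs + 1 := by rw [pvTw_cons, if_pos hp]
      rw [pvRunTable_cons, htw, pvDesc_succ]
      have hdrop : (x :: xs).drop (pvTw xs + 1) = xs.drop (pvTw xs) := by simp
      rw [hdrop, List.cons_append, ih]
    · have htw : pvTw (x :: xs) = 0 := by rw [pvTw_cons, if_neg hp]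
      rw [htw]
      simp [pvDesc]

-- max(run): the table is h :: t with h ≥ 0, so Python's max is the running fold from 0
def pvBN (l : List Int) : Int := (pvRunTable l).foldl max 0

theorem pvRunTable_shape (l : List Int) :
    pvRunTable l = (pvRunTable l).headD 0 :: (pvRunTable l).tail := by
  cases l <;> simp [pvRunTable]

theorem max?_pvRunTable (l : List Int) :
    PySem.List.max? (pvRunTable l) (fun v => v) = some (pvBN l) := by
  have h0 : 0 ≤ (pvRunTable l).headD 0 := by
    rw [pvRunTable_head]; positivity
  conv_lhs => rw [pvRunTable_shape l]
  rw [PySem.List.max?_id_cons]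
  unfold pvBN
  conv_rhs => rw [pvRunTable_shape l]
  rw [List.foldl_cons, max_eq_right h0]

theorem pvBN_mem (l : List Int) (h : 2 ≤ pvBN l) : pvBN l ∈ pvRunTable l := by
  rcases PySem.List.foldl_max_mem (pvRunTable l) 0 with h0 | hm
  · unfold pvBN at h; omega
  · exact hm

theorem foldl_max_seed (t : List Int) (a b : Int) :
    t.foldl max (max a b) = max a (t.foldl max b) := by
  induction t generalizing b with
  | nil => rfl
  | cons x t ih =>
    rw [List.foldl_cons, List.foldl_cons, max_assoc, ih]

theorem pvBN_desc (k : Nat) : (pvDesc k).foldl max 0 = (k : Int) := by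
  induction k with
  | zero => simp [pvDesc]
  | succ k ih =>
    rw [pvDesc_succ, List.foldl_cons]
    have : max 0 ((k + 1 : Nat) : Int) = max ((k + 1 : Nat) : Int) 0 := max_comm _ _
    rw [this, foldl_max_seed, ih]
    push_cast
    omega

theorem pvBN_decomp (l : List Int) :
    pvBN l = max ((pvTw l : Nat) : Int) (pvBN (l.drop (pvTw l))) := by
  unfold pvBN
  conv_lhs => rw [pvRunTable_decomp l]
  rw [List.foldl_append, pvBN_desc]
  have h1 : ((pvTw l : Nat) : Int) = max ((pvTw l : Nat) : Int) 0 := by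
    rw [max_eq_left]; positivity
  conv_lhs => rw [h1]
  rw [foldl_max_seed]

theorem pvBN_cons_notprime (x : Int) (xs : List Int) (hp : ¬ primeNumber x) :
    pvBN (x :: xs) = pvBN xs := by
  unfold pvBN
  rw [pvRunTable_cons, pvTw_cons, if_neg hp, List.foldl_cons]
  norm_num

-- first index of v in s ++ t when v is not in s
theorem index?_append_of_not_mem (s t : List Int) (v : Int) (hv : v ∉ s) :
    PySem.List.index? (s ++ t) v = (PySem.List.index? t v).map (· + s.length) := by
  induction s with
  | nil =>
    simp only [List.nil_append, List.length_nil]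
    cases PySem.List.index? t v <;> simp
  | cons x s ih =>
    have hx : x ≠ v := fun h => hv (h ▸ List.mem_cons_self)
    rw [List.cons_append, PySem.List.index?_cons_of_ne (s ++ t) hx,
        ih (fun h => hv (List.mem_cons_of_mem x h))]
    cases PySem.List.index? t v with
    | none => simp
    | some j => simp; omega

-- pvRuns after the leading run: dropping the run's separator too
theorem pvRuns_dropWhile (l : List Int) :
    pvRuns (l.dropWhile primeNumber) = pvRuns (l.drop (pvTw l + 1)) := by
  cases h : l.dropWhile primeNumber with
  | nil =>
    have : l.drop (pvTw l) = [] := by unfold pvTw; rw [← pvDropWhile_eq_drop]; exact h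
    have : l.drop (pvTw l + 1) = [] := List.drop_eq_nil_of_le (by
      have := List.drop_eq_nil_iff.mp this; omega)
    rw [this]
  | cons c rest =>
    have hc : ¬ primeNumber c := by
      have := List.head?_dropWhile_not primeNumber l
      rw [h] at this
      simpa using this
    have hrest : l.drop (pvTw l + 1) = rest := by
      have h1 : l.drop (pvTw l) = c :: rest := by
        unfold pvTw; rw [← pvDropWhile_eq_drop]; exact h
      have := congrArg List.tail h1
      rwa [List.tail_drop] at this
    rw [pvRuns, if_neg hc, hrest]

-- unfold B at a list whose max?/index? data is known
theorem pvAlt_eval (l : List Int) (b : Int) (i : Nat)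
    (hb : pvBN l = b) (h2 : 2 ≤ b)
    (hi : PySem.List.index? (pvRunTable l) b = some i) :
    primeNrSequence_alt l = (l.drop i).take b.toNat := by
  have h1 : primeNrSequence_alt l =
      (if b < 2 then []
       else
         match PySem.List.index? (pvRunTable l) b with
         | none => []
         | some i => PySem.List.slice l (some (i : Int)) (some ((i : Int) + b))) := by
    unfold primeNrSequence_alt
    rw [max?_pvRunTable, hb]
  rw [h1, if_neg (by omega), hi]
  show PySem.List.slice l (some (i : Int)) (some ((i : Int) + b)) = _
  rw [show ((i : Int) + b) = ((i : Int) + ((b.toNat : Nat) : Int)) by omega,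
      PySem.List.slice_natCast_add]

theorem pvAlt_small (l : List Int) (hb : pvBN l < 2) :
    primeNrSequence_alt l = [] := by
  have h1 : primeNrSequence_alt l =
      (if pvBN l < 2 then []
       else
         match PySem.List.index? (pvRunTable l) (pvBN l) with
         | none => []
         | some i => PySem.List.slice l (some (i : Int)) (some ((i : Int) + pvBN l))) := by
    unfold primeNrSequence_alt
    rw [max?_pvRunTable]
  rw [h1, if_pos hb]

theorem pvTake_tw (l : List Int) : l.take (pvTw l) = l.takeWhile primeNumber :=
  (List.prefix_iff_eq_take.mp (List.takeWhile_prefix _)).symm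

theorem pvIndex_exists (l : List Int) (h2 : 2 ≤ pvBN l) :
    ∃ i, PySem.List.index? (pvRunTable l) (pvBN l) = some i := by
  have hmem := pvBN_mem l h2
  cases hidx : PySem.List.index? (pvRunTable l) (pvBN l) with
  | none => exact absurd hmem ((PySem.List.index?_eq_none_iff _ _).mp hidx)
  | some i => exact ⟨i, rfl⟩

theorem pvMain_nil :
    primeNrSequence_alt [] = pvM (pvRuns []) ∧
    (pvM (pvRuns [])).length = (if 2 ≤ pvBN [] then (pvBN []).toNat else 0) := by
  have hb : pvBN ([] : List Int) = 0 := by simp [pvBN, pvRunTable]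
  have hr : pvRuns ([] : List Int) = [] := by rw [pvRuns]
  refine ⟨?_, ?_⟩
  · rw [pvAlt_small [] (by omega), hr]; rfl
  · rw [hr, hb]; rfl

-- MAIN INDUCTION: B equals the first longest qualifying run, whose length is the
-- table maximum when that maximum is ≥ 2 (and 0 otherwise)
theorem pvMain : ∀ (n : Nat) (l : List Int), l.length ≤ n →
    primeNrSequence_alt l = pvM (pvRuns l) ∧
    (pvM (pvRuns l)).length = (if 2 ≤ pvBN l then (pvBN l).toNat else 0) := by
  intro n
  induction n with
  | zero =>
    intro l hl
    have h0 : l = [] := List.eq_nil_of_length_eq_zero (by omega)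
    exact h0 ▸ pvMain_nil
  | succ n ih =>
    intro l hl
    cases l with
    | nil => exact pvMain_nil
    | cons x xs =>
      by_cases hp : primeNumber x
      · -- prime head: the table starts with the descending block of the leading run
        have htw : pvTw (x :: xs) = pvTw xs + 1 := by rw [pvTw_cons, if_pos hp]
        have hdrop1 : (x :: xs).drop (pvTw (x :: xs)) = xs.drop (pvTw xs) := by
          rw [htw]; exact List.drop_succ_cons
        have hlen' : ((x :: xs).drop (pvTw (x :: xs))).length ≤ n := by
          rw [hdrop1]; simp only [List.length_drop]
          simp only [List.length_cons] at hl; omega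
        obtain ⟨ihB, ihL⟩ := ih _ hlen'
        have hl'dw : (x :: xs).drop (pvTw (x :: xs)) = (x :: xs).dropWhile primeNumber := by
          unfold pvTw; rw [← pvDropWhile_eq_drop]
        have hruns2 : pvRuns ((x :: xs).drop (pvTw (x :: xs)))
            = pvRuns (xs.drop (pvTw xs + 1)) := by
          rw [hl'dw, pvRuns_dropWhile (x :: xs), htw]
          rw [show pvTw xs + 1 + 1 = (pvTw xs + 1) + 1 from rfl, List.drop_succ_cons]
        have hruns : pvRuns (x :: xs)
            = (x :: xs.takeWhile primeNumber) :: pvRuns (xs.drop (pvTw xs + 1)) := by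
          rw [pvRuns, if_pos hp]; rfl
        have hrlen : (x :: xs.takeWhile primeNumber).length = pvTw (x :: xs) := by
          rw [htw]; simp [pvTw]
        have hbn : pvBN (x :: xs)
            = max ((pvTw (x :: xs) : Nat) : Int) (pvBN ((x :: xs).drop (pvTw (x :: xs)))) :=
          pvBN_decomp (x :: xs)
        rw [hruns2] at ihL
        by_cases hm : pvBN ((x :: xs).drop (pvTw (x :: xs))) ≤ ((pvTw (x :: xs) : Nat) : Int)
        · by_cases hk2 : 2 ≤ pvTw (x :: xs)
          · -- the leading run is the first longest qualifying one
            have hb : pvBN (x :: xs) = ((pvTw (x :: xs) : Nat) : Int) := by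
              rw [hbn]; exact max_eq_left hm
            obtain ⟨k', hk'⟩ : ∃ k', pvTw (x :: xs) = k' + 1 := ⟨pvTw xs, htw⟩
            have hidx : PySem.List.index? (pvRunTable (x :: xs))
                ((pvTw (x :: xs) : Nat) : Int) = some 0 := by
              rw [pvRunTable_decomp (x :: xs), hk', pvDesc_succ, List.cons_append]
              exact PySem.List.index?_cons_self _ _
            have hB := pvAlt_eval (x :: xs) _ 0 hb (by exact_mod_cast hk2) hidx
            have hMlen : (pvM (pvRuns (xs.drop (pvTw xs + 1)))).length ≤ pvTw (x :: xs) := by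
              rw [ihL]
              split_ifs with h2'
              · omega
              · omega
            have hcond : (x :: xs.takeWhile primeNumber).length > 1 ∧
                (pvM (pvRuns (xs.drop (pvTw xs + 1)))).length
                  ≤ (x :: xs.takeWhile primeNumber).length := by
              rw [hrlen]; exact ⟨by omega, hMlen⟩
            have hMv : pvM (pvRuns (x :: xs)) = x :: xs.takeWhile primeNumber := by
              rw [hruns]; simp only [pvM]; rw [if_pos hcond]
            refine ⟨?_, ?_⟩
            · rw [hB, hMv, List.drop_zero, Int.toNat_natCast]
              rw [show ((x :: xs).take (pvTw (x :: xs))) = (x :: xs).takeWhile primeNumber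
                    from pvTake_tw (x :: xs)]
              rw [List.takeWhile_cons_of_pos hp]
            · rw [hMv, hrlen, hb, if_pos (by exact_mod_cast hk2), Int.toNat_natCast]
          · -- leading run has length 1 and nothing after it qualifies: no answer
            have hk1 : pvTw (x :: xs) = 1 := by omega
            have hlt : pvBN (x :: xs) < 2 := by
              rw [hbn, hk1]
              rw [max_lt_iff]
              constructor
              · norm_num
              · rw [hk1] at hm; omega
            have hM0 : (pvM (pvRuns (xs.drop (pvTw xs + 1)))).length = 0 := by
              rw [ihL, if_neg (by rw [hk1] at hm; omega)]
            have hMv : pvM (pvRuns (x :: xs)) = [] := by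
              rw [hruns]; simp only [pvM]
              rw [if_neg (by rw [hrlen, hk1]; omega)]
              exact List.length_eq_zero_iff.mp hM0
            exact ⟨by rw [pvAlt_small _ hlt, hMv], by rw [hMv, if_neg (by omega)]; rfl⟩
        · -- the best run lies strictly after the leading one
          rw [not_le] at hm
          have hk1 : 1 ≤ pvTw (x :: xs) := by omega
          have h2' : 2 ≤ pvBN ((x :: xs).drop (pvTw (x :: xs))) := by
            have : (1 : Int) ≤ ((pvTw (x :: xs) : Nat) : Int) := by exact_mod_cast hk1
            omega
          obtain ⟨i', hi'⟩ := pvIndex_exists _ h2'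
          have hb : pvBN (x :: xs) = pvBN ((x :: xs).drop (pvTw (x :: xs))) := by
            rw [hbn]; exact max_eq_right (le_of_lt hm)
          have hnotmem : pvBN ((x :: xs).drop (pvTw (x :: xs))) ∉ pvDesc (pvTw (x :: xs)) := by
            intro hmem
            have := (mem_pvDesc _ _ hmem).2
            omega
          have hidx : PySem.List.index? (pvRunTable (x :: xs))
              (pvBN ((x :: xs).drop (pvTw (x :: xs)))) = some (i' + pvTw (x :: xs)) := by
            rw [pvRunTable_decomp (x :: xs),
                index?_append_of_not_mem _ _ _ hnotmem, hi', length_pvDesc]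
            rfl
          have hB := pvAlt_eval (x :: xs) _ _ hb h2' hidx
          have hB' := pvAlt_eval ((x :: xs).drop (pvTw (x :: xs))) _ i' rfl h2' hi'
          have hdd : (x :: xs).drop (i' + pvTw (x :: xs))
              = ((x :: xs).drop (pvTw (x :: xs))).drop i' := by
            rw [List.drop_drop, Nat.add_comm (pvTw (x :: xs)) i']
          have hMlen : (pvM (pvRuns (xs.drop (pvTw xs + 1)))).length
              = (pvBN ((x :: xs).drop (pvTw (x :: xs)))).toNat := by
            rw [ihL, if_pos h2']
          have hMv : pvM (pvRuns (x :: xs)) = pvM (pvRuns (xs.drop (pvTw xs + 1))) := by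
            rw [hruns]; simp only [pvM]
            rw [if_neg]
            intro hcond
            rw [hrlen] at hcond
            have := hcond.2
            rw [hMlen] at this
            omega
          refine ⟨?_, ?_⟩
          · rw [hB, hMv, hdd, ← hB', ihB, hruns2]
          · rw [hMv, hMlen, hb, if_pos (by rw [hb] at *; omega)]
      · -- non-prime head: everything is decided by the tail
        have hlen : xs.length ≤ n := by simp only [List.length_cons] at hl; omega
        obtain ⟨ihB, ihL⟩ := ih xs hlen
        have hbn : pvBN (x :: xs) = pvBN xs := pvBN_cons_notprime x xs hp
        have hruns : pvRuns (x :: xs) = pvRuns xs := by rw [pvRuns, if_neg hp]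
        by_cases h2 : 2 ≤ pvBN xs
        · obtain ⟨i, hi⟩ := pvIndex_exists xs h2
          have hiC : PySem.List.index? (pvRunTable (x :: xs)) (pvBN xs) = some (i + 1) := by
            rw [pvRunTable_cons, pvTw_cons, if_neg hp]
            have hne : ((0 : Nat) : Int) ≠ pvBN xs := by push_cast; omega
            rw [PySem.List.index?_cons_of_ne _ hne, hi]
            rfl
          have hB := pvAlt_eval (x :: xs) _ _ hbn h2 hiC
          have hBxs := pvAlt_eval xs _ i rfl h2 hi
          refine ⟨?_, ?_⟩
          · rw [hB, hruns, ← ihB, hBxs, List.drop_succ_cons]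
          · rw [hruns, hbn]; exact ihL
        · refine ⟨?_, ?_⟩
          · rw [pvAlt_small _ (by omega : pvBN (x :: xs) < 2), hruns]
            have h0 : (pvM (pvRuns xs)).length = 0 := by rw [ihL, if_neg h2]
            exact (List.length_eq_zero_iff.mp h0).symm
          · rw [hruns, hbn]; exact ihL

-- ===== VERDICT (by name: the statement is the Claim_ definition above) =====
theorem primeNrSequence_spec : Claim_equal_primeNrSequence := by
  intro l _
  unfold Spec_primeNrSequence primeNrSequence
  rw [pvOuterA_eq l l.length 0 [] (by omega), List.drop_zero, foldl_pvUpd_nil]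
  exact ((pvMain l.length l le_rfl).1).symm
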